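-- pv_equiv track=rewrite | github.com/danvk/oldnyc | oldnyc/site/dates_from_text.py | split_with_indices
-- ===== SOURCE A (Python) =====
-- def split_with_indices(txt: str, delim: str):
--     indices: list[int] = []
--     start = 0
--     while True:
--         try:
--             idx = txt.index(delim, start)
--         except ValueError:
--             break
--         indices.append(idx)
--         start = idx + 1
--
--     indices = [-1] + indices + [len(txt)]
--     return [(txt[a + len(delim) : b], a + len(delim), b) for a, b in zip(indices, indices[1:])]
-- ===== SOURCE B (Python) =====
-- def split_with_indices(txt: str, delim: str):
--     out = []
--     prev = -1
--     start = 0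
--     L = len(delim)
--     while True:
--         idx = txt.find(delim, start)
--         if idx == -1:
--             out.append((txt[prev + L:], prev + L, len(txt)))
--             return out
--         out.append((txt[prev + L:idx], prev + L, idx))
--         prev = idx
--         start = idx + 1
-- ===== Notes on version B (the rewrite author's own statement) =====
-- stated objective: simpler
-- what changed: A first collects all match indices in a list, pads it with -1 and len(txt), and pairs adjacent entries with zip to build the tuples; B is a single streaming loop that emits each (substring, start, end) tuple as soon as the next match is found, dropping the index list, the padding and the zip pass.
import Mathlib
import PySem

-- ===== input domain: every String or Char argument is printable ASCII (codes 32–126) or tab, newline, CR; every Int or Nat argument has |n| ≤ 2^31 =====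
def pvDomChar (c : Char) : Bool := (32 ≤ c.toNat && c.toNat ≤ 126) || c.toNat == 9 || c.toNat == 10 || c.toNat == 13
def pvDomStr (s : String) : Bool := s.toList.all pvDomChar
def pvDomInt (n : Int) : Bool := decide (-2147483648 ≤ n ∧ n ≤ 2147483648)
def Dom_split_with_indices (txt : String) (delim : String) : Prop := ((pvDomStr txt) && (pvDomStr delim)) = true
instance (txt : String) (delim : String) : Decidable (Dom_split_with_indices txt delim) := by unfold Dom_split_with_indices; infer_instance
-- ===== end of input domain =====

-- B fuses A's two passes (collect all match indices, then zip-pair them) into one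
-- streaming loop that emits each (substring, start, end) tuple as soon as the next
-- match is found; objective: simpler (no index list, no [-1]/len padding, no zip).

-- ===== PORT A =====
-- A's while-loop collecting match indices; the fuel (txt.length + 2 at the call
-- site) only totalizes the loop — start strictly increases each iteration and a
-- match needs start ≤ len(txt), so the fuel is never exhausted (fuel 0 = break).
def pvAIdxLoop (txt delim : String) (start : Int) (acc : List Int) : Nat → List Int
  | 0 => acc
  | fuel + 1 =>
    let idx := PySem.Str.findFrom txt delim start none
    if idx = -1 then acc
    else pvAIdxLoop txt delim (idx + 1) (acc ++ [idx]) fuel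

-- A's final comprehension: [(txt[a+len(delim):b], a+len(delim), b) for a, b in zip(l, l[1:])]
def pvAPairs (txt delim : String) (l : List Int) : List (String × Int × Int) :=
  (l.zip l.tail).map (fun p =>
    (PySem.Str.slice txt (some (p.1 + PySem.Str.len delim)) (some p.2),
     p.1 + PySem.Str.len delim, p.2))

def split_with_indices (txt : String) (delim : String) : List (String × Int × Int) :=
  let indices := pvAIdxLoop txt delim 0 [] (txt.length + 2)
  pvAPairs txt delim (-1 :: (indices ++ [PySem.Str.len txt]))

-- ===== PORT B =====
-- B's single streaming loop (Source B); same fuel-totalization remark as for A — the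
-- fuel-0 case coincides with the find-returns-(-1) exit and is never reached.
def pvBLoop (txt delim : String) (prev start : Int)
    (acc : List (String × Int × Int)) : Nat → List (String × Int × Int)
  | 0 => acc ++ [(PySem.Str.slice txt (some (prev + PySem.Str.len delim)) none,
                  prev + PySem.Str.len delim, PySem.Str.len txt)]
  | fuel + 1 =>
    let idx := PySem.Str.findFrom txt delim start none
    if idx = -1 then
      acc ++ [(PySem.Str.slice txt (some (prev + PySem.Str.len delim)) none,
               prev + PySem.Str.len delim, PySem.Str.len txt)]
    else
      pvBLoop txt delim idx (idx + 1)
        (acc ++ [(PySem.Str.slice txt (some (prev + PySem.Str.len delim)) (some idx),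
                  prev + PySem.Str.len delim, idx)]) fuel

def split_with_indices_alt (txt : String) (delim : String) : List (String × Int × Int) :=
  pvBLoop txt delim (-1) 0 [] (txt.length + 2)

-- ===== PRECONDITION & SPEC =====
def Spec_split_with_indices (txt : String) (delim : String) (out : List (String × Int × Int)) : Prop := out = split_with_indices_alt txt delim
instance (txt : String) (delim : String) (out : List (String × Int × Int)) : Decidable (Spec_split_with_indices txt delim out) := by unfold Spec_split_with_indices; infer_instance

-- ===== CLAIM (what is proved, stated in full; the proofs are below) =====
def Claim_equal_split_with_indices : Prop := ∀ (txt : String) (delim : String), Dom_split_with_indices txt delim → Spec_split_with_indices txt delim (split_with_indices txt delim)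

-- ===== LEMMAS AND PROOFS =====

-- txt[a:len(txt)] = txt[a:] for every Int a (the only place A's and B's tuples differ textually)
theorem pv_slice_len_eq_slice_none (txt : String) (a : Int) :
    PySem.Str.slice txt (some a) (some ((txt.length : Int))) = PySem.Str.slice txt (some a) none := by
  apply String.toList_inj.mp
  simp only [PySem.Str.toList_slice, PySem.Chars.slice_eq_listSlice]
  rw [show ((txt.length : Int)) = ((txt.toList.length : Int)) from by simp]
  simp only [PySem.List.slice, PySem.List.clampIdx, Int.toNat_natCast,
    List.take_eq_take_iff, List.length_drop]
  split_ifs <;> omega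

theorem pvAIdxLoop_acc (txt delim : String) :
    ∀ (fuel : Nat) (start : Int) (acc : List Int),
      pvAIdxLoop txt delim start acc fuel = acc ++ pvAIdxLoop txt delim start [] fuel := by
  intro fuel
  induction fuel with
  | zero => intro start acc; simp [pvAIdxLoop]
  | succ n ih =>
    intro start acc
    simp only [pvAIdxLoop]
    by_cases h : PySem.Str.findFrom txt delim start none = -1
    · rw [if_pos h, if_pos h]; simp
    · rw [if_neg h, if_neg h, ih _ (acc ++ _), ih _ ([] ++ _)]
      simp

theorem pvBLoop_acc (txt delim : String) :
    ∀ (fuel : Nat) (prev start : Int) (acc : List (String × Int × Int)),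
      pvBLoop txt delim prev start acc fuel = acc ++ pvBLoop txt delim prev start [] fuel := by
  intro fuel
  induction fuel with
  | zero => intro prev start acc; simp [pvBLoop]
  | succ n ih =>
    intro prev start acc
    simp only [pvBLoop]
    by_cases h : PySem.Str.findFrom txt delim start none = -1
    · rw [if_pos h, if_pos h]; simp
    · rw [if_neg h, if_neg h, ih _ _ (acc ++ _), ih _ _ ([] ++ _)]
      simp

theorem pvAPairs_cons (txt delim : String) (a b : Int) (t : List Int) :
    pvAPairs txt delim (a :: b :: t) =
      (PySem.Str.slice txt (some (a + PySem.Str.len delim)) (some b),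
       a + PySem.Str.len delim, b) :: pvAPairs txt delim (b :: t) := by
  simp [pvAPairs]

-- the heart: A's pair-comprehension over (prev :: found-indices ++ [len]) IS B's streaming loop
theorem pv_main (txt delim : String) :
    ∀ (fuel : Nat) (start prev : Int),
      pvAPairs txt delim (prev :: (pvAIdxLoop txt delim start [] fuel ++ [PySem.Str.len txt]))
        = pvBLoop txt delim prev start [] fuel := by
  intro fuel
  induction fuel with
  | zero =>
    intro start prev
    simp [pvAIdxLoop, pvBLoop, pvAPairs]
    exact pv_slice_len_eq_slice_none txt _
  | succ n ih =>
    intro start prev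
    simp only [pvAIdxLoop, pvBLoop]
    by_cases h : PySem.Str.findFrom txt delim start none = -1
    · rw [if_pos h, if_pos h]
      simp [pvAPairs]
      exact pv_slice_len_eq_slice_none txt _
    · rw [if_neg h, if_neg h,
        pvAIdxLoop_acc txt delim n _ ([] ++ [_]), pvBLoop_acc txt delim n _ _ ([] ++ [_])]
      simp only [List.nil_append, List.cons_append]
      rw [pvAPairs_cons, ih]

-- ===== VERDICT (by name: the statement is the Claim_ definition above) =====
theorem split_with_indices_spec : Claim_equal_split_with_indices := by
  intro txt delim _
  unfold Spec_split_with_indices split_with_indices split_with_indices_alt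
  exact pv_main txt delim (txt.length + 2) 0 (-1)
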